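-- pv_equiv track=rewrite | github.com/Nghia03092004/nghia03092004.github.io | project_euler/problem_851/solution.py | pi_to_string
-- ===== SOURCE A (Python) =====
-- def pi_to_string(pi, n):
--     """Convert PI to readable string."""
--     val, dash = pi
--     chars = []
--     for i in range(n-1, -1, -1):
--         if (dash >> i) & 1:
--             chars.append('-')
--         elif (val >> i) & 1:
--             chars.append('1')
--         else:
--             chars.append('0')
--     return ''.join(chars)
-- ===== SOURCE B (Python) =====
-- def pi_to_string(pi, n):
--     """Convert PI to readable string."""
--     val, dash = pi
--     if n <= 0:
--         return ''
--     m = 1 << n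
--     vs = format(val % m, 'b').zfill(n)
--     ds = format(dash % m, 'b').zfill(n)
--     return ''.join('-' if d == '1' else v for v, d in zip(vs, ds))
-- ===== Notes on version B (the rewrite author's own statement) =====
-- stated objective: idiomatic
-- what changed: B replaces A's per-position shift-and-mask loop by a whole-value strategy: mask both integers to their low n bits with one modular reduction, render each as a zero-padded binary string via format(...,'b').zfill(n), and merge the two strings positionwise with zip ('-' where the dash digit is '1', else the value digit).
import Mathlib
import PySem

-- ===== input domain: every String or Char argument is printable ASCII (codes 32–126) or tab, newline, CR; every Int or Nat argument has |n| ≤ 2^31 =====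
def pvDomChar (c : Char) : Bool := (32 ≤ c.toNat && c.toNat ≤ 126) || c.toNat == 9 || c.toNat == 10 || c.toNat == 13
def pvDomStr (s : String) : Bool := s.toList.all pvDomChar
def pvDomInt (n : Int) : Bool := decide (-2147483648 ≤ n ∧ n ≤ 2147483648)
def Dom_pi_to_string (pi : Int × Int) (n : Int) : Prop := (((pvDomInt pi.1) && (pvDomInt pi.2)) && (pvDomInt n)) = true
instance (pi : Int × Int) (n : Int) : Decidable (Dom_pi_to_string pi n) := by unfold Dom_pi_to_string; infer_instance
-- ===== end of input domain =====

-- B replaces A's per-position shift-and-mask loop by masking both integers to their low n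
-- bits, rendering each as a zero-padded binary string, and merging the two strings with zip
-- (objective: idiomatic).

-- ===== PORT A =====
-- Python's '>>' on int is Lean's '>>>' (arithmetic, floors on negatives); the shift amount
-- i is ≥ 0 on every iteration of range(n-1,-1,-1), so 'i.toNat' is exact; Python's '& 1'
-- (two's complement) is 'Int.land · 1'; truthiness of the 0/1 result is '≠ 0'.
def pi_to_string (pi : Int × Int) (n : Int) : String :=
  let val := pi.1
  let dash := pi.2
  let chars : List Char :=
    (PySem.List.pyRange (n - 1) (-1) (-1)).foldl (fun chars i =>
      if Int.land (dash >>> i.toNat) 1 ≠ 0 then chars ++ ['-']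
      else if Int.land (val >>> i.toNat) 1 ≠ 0 then chars ++ ['1']
      else chars ++ ['0']) []
  String.mk chars

-- ===== PORT B =====
-- pvBinLSB/pvFmt port Python's format(x, 'b') for x ≥ 0 exactly: the binary digits of x,
-- most significant first, with format(0,'b') = '0'.
def pvBinLSB (x : Nat) : List Char :=
  if h : x = 0 then []
  else (if x % 2 = 1 then '1' else '0') :: pvBinLSB (x / 2)
  decreasing_by exact Nat.div_lt_self (Nat.pos_of_ne_zero h) one_lt_two

def pvFmt (x : Nat) : List Char :=
  if x = 0 then ['0'] else (pvBinLSB x).reverse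

-- ports str.zfill(n): pad with '0' on the left to length n
def pvZfill (n : Nat) (s : List Char) : List Char :=
  List.replicate (n - s.length) '0' ++ s

-- transliterates Source B: early return '' for n ≤ 0; m = 1 << n (= 2^n); mask both ints with
-- Python '%' (nonnegative result, so '.toNat' is exact); format to binary, zfill, zip-merge.
def pi_to_string_alt (pi : Int × Int) (n : Int) : String :=
  if n ≤ 0 then "" else
    let m : Int := 2 ^ n.toNat
    let vs := pvZfill n.toNat (pvFmt (PySem.Int.mod pi.1 m).toNat)
    let ds := pvZfill n.toNat (pvFmt (PySem.Int.mod pi.2 m).toNat)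
    String.mk ((vs.zip ds).map (fun p => if p.2 = '1' then '-' else p.1))

-- ===== PRECONDITION & SPEC =====
def Spec_pi_to_string (pi : Int × Int) (n : Int) (out : String) : Prop := out = pi_to_string_alt pi n
instance (pi : Int × Int) (n : Int) (out : String) : Decidable (Spec_pi_to_string pi n out) := by unfold Spec_pi_to_string; infer_instance

-- ===== CLAIM (what is proved, stated in full; the proofs are below) =====
def Claim_equal_pi_to_string : Prop := ∀ (pi : Int × Int) (n : Int), Dom_pi_to_string pi n → Spec_pi_to_string pi n (pi_to_string pi n)

-- ===== LEMMAS AND PROOFS =====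

-- the character A emits for bit position j
def pvBitChar (val dash : Int) (j : Nat) : Char :=
  if Int.land (dash >>> j) 1 ≠ 0 then '-'
  else if Int.land (val >>> j) 1 ≠ 0 then '1' else '0'

-- the low K bits of x as characters, least significant first
def pvBits (K x : Nat) : List Char :=
  (List.range K).map (fun j => if x.testBit j then '1' else '0')

theorem pvLdiffOne (m : Nat) : Nat.ldiff 1 m = 1 - m % 2 := by
  apply Nat.eq_of_testBit_eq
  intro k
  rw [Nat.testBit_ldiff]
  rcases k with _ | k <;>
    rcases Nat.mod_two_eq_zero_or_one m with h | h <;>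
      simp [Nat.testBit_zero, Nat.testBit_succ, h]

theorem pvLandOne (x : Int) : Int.land x 1 = x % 2 := by
  rcases x with m | m
  · show Int.ofNat (m &&& 1) = _
    rw [Nat.and_one_is_mod]
    simp only [Int.ofNat_eq_natCast]
    omega
  · show Int.ofNat (Nat.ldiff 1 m) = _
    rw [pvLdiffOne]
    simp only [Int.ofNat_eq_natCast, Int.negSucc_eq]
    omega

theorem pvTestBitDiv (x j : Nat) : x.testBit j = decide (x / 2 ^ j % 2 = 1) := by
  rw [Nat.testBit, Nat.shiftRight_eq_div_pow, Nat.one_and_eq_mod_two]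
  rcases Nat.mod_two_eq_zero_or_one (x / 2 ^ j) with h | h <;> simp [h]

-- A's test on bit j equals the test on bit j of the low-K-bit mask, for j < K
theorem pvBitEq (val : Int) (K j : Nat) (hj : j < K) :
    (Int.land (val >>> j) 1 ≠ 0) ↔ ((val % (2 ^ K : Int)).toNat).testBit j = true := by
  rw [pvLandOne, Int.shiftRight_eq_div_pow]
  have hKpos : (0:Int) < 2 ^ K := by positivity
  have hx0 : 0 ≤ val % (2 ^ K : Int) := Int.emod_nonneg _ (by positivity)
  set x : Int := val % (2 ^ K : Int) with hxdef
  set q : Int := val / (2 ^ K : Int) with hqdef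
  have hsplit : (2:Int) ^ (K - j) * 2 ^ j = 2 ^ K := by
    rw [← pow_add]; congr 1; omega
  have h2 : 2 ^ (K - j) * q * 2 ^ j = 2 ^ K * q := by
    rw [mul_assoc, mul_comm q ((2:Int) ^ j), ← mul_assoc, hsplit]
  have hval : val = x + 2 ^ (K - j) * q * 2 ^ j := by
    have h3 := Int.emod_add_ediv val (2 ^ K)
    rw [← hxdef, ← hqdef] at h3
    linarith [h2, h3]
  have hdiv : val / ((2:Int) ^ j) = x / 2 ^ j + 2 ^ (K - j) * q := by
    rw [hval]; exact Int.add_mul_ediv_right _ _ (by positivity)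
  have hKj : ∃ t : Nat, K - j = t + 1 := ⟨K - j - 1, by omega⟩
  obtain ⟨t, ht⟩ := hKj
  have hmod : val / ((2:Int) ^ j) % 2 = x / 2 ^ j % 2 := by
    rw [hdiv, ht, pow_succ, mul_comm ((2:Int) ^ t) 2, mul_assoc]
    exact Int.add_mul_emod_self_left _ _ _
  have hcast : ((x.toNat / 2 ^ j % 2 : Nat) : Int) = x / 2 ^ j % 2 := by
    push_cast [Int.toNat_of_nonneg hx0]; ring
  rw [pvTestBitDiv]
  simp only [decide_eq_true_iff]
  push_cast
  rw [hmod]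
  omega

-- pvBits of K+1 bits peels off the low bit
theorem pvBits_succ (K x : Nat) :
    pvBits (K + 1) x =
      (if x % 2 = 1 then '1' else '0') :: pvBits K (x / 2) := by
  rw [pvBits, List.range_succ_eq_map, List.map_cons, List.map_map]
  simp [pvBits, Nat.testBit_zero, Nat.testBit_succ, Function.comp_def]

theorem pvBits_zero (K : Nat) : pvBits K 0 = List.replicate K '0' := by
  simp [pvBits, Nat.zero_testBit, List.map_const']

-- the binary digits, padded on the high side with zeros, are the low K bits (LSB first)
theorem pvB1 (K : Nat) : ∀ x : Nat, x < 2 ^ K →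
    pvBits K x = pvBinLSB x ++ List.replicate (K - (pvBinLSB x).length) '0' := by
  induction K with
  | zero =>
      intro x hx
      interval_cases x
      rw [pvBinLSB]
      simp [pvBits]
  | succ K ih =>
      intro x hx
      by_cases hx0 : x = 0
      · subst hx0
        rw [pvBinLSB]
        simp [pvBits_zero]
      · rw [pvBinLSB, dif_neg hx0, pvBits_succ,
          ih (x / 2) (by rw [pow_succ] at hx; omega)]
        simp only [List.cons_append, List.length_cons]
        have hlen : K + 1 - ((pvBinLSB (x / 2)).length + 1)
            = K - (pvBinLSB (x / 2)).length := by omega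
        rw [hlen]

-- zfill of the formatted value is the reversed low-bit list
theorem pvZ (K x : Nat) (hK : 1 ≤ K) (hx : x < 2 ^ K) :
    pvZfill K (pvFmt x) = (pvBits K x).reverse := by
  by_cases hx0 : x = 0
  · subst hx0
    rw [pvFmt, if_pos rfl, pvBits_zero, pvZfill, List.reverse_replicate]
    have : K = (K - 1) + 1 := by omega
    rw [this, List.replicate_succ' (n := K - 1)]
    simp
  · rw [pvFmt, if_neg hx0, pvZfill, pvB1 K x hx, List.reverse_append,
      List.reverse_replicate, List.length_reverse]

-- A's foldl is a map of pvBitChar over the countdown range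
theorem pvFoldA (val dash : Int) (l : List Int) (acc : List Char) :
    l.foldl (fun chars i =>
      if Int.land (dash >>> i.toNat) 1 ≠ 0 then chars ++ ['-']
      else if Int.land (val >>> i.toNat) 1 ≠ 0 then chars ++ ['1']
      else chars ++ ['0']) acc = acc ++ l.map (fun i => pvBitChar val dash i.toNat) := by
  induction l generalizing acc with
  | nil => simp
  | cons i l ih =>
      rw [List.foldl_cons, ih, List.map_cons]
      simp only [pvBitChar, Int.shiftRight_natCast_right]
      split_ifs <;> simp

theorem pvMapReverse {α : Type} (K : Nat) (f : Nat → α) :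
    ((List.range K).map f).reverse = (List.range K).map (fun j => f (K - 1 - j)) := by
  apply List.ext_getElem <;> simp

theorem pi_to_string_eq (pi : Int × Int) (n : Int) :
    pi_to_string pi n = pi_to_string_alt pi n := by
  rcases pi with ⟨val, dash⟩
  unfold pi_to_string pi_to_string_alt
  simp only
  rw [pvFoldA, PySem.List.pyRange_neg_one, List.nil_append, List.map_map]
  have hK : (n - 1 - (-1)).toNat = n.toNat := by omega
  by_cases hn : n ≤ 0
  · rw [if_pos hn]
    have : (n - 1 - (-1)).toNat = 0 := by omega
    rw [this]
    simp
    rfl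
  · rw [if_neg hn]
    set K := n.toNat with hKdef
    have hK1 : 1 ≤ K := by omega
    have hm : (0:Int) < 2 ^ K := by positivity
    have hmodv : PySem.Int.mod val (2 ^ K) = val % (2 ^ K : Int) :=
      PySem.Int.mod_eq_emod_of_pos hm
    have hmodd : PySem.Int.mod dash (2 ^ K) = dash % (2 ^ K : Int) :=
      PySem.Int.mod_eq_emod_of_pos hm
    have h2K : ((2 ^ K : Nat) : Int) = (2 : Int) ^ K := by push_cast; rfl
    have hvlt : (val % (2 ^ K : Int)).toNat < 2 ^ K := by
      have h1 := Int.emod_lt_of_pos val hm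
      have h0 := Int.emod_nonneg val (show (2:Int) ^ K ≠ 0 by positivity)
      omega
    have hdlt : (dash % (2 ^ K : Int)).toNat < 2 ^ K := by
      have h1 := Int.emod_lt_of_pos dash hm
      have h0 := Int.emod_nonneg dash (show (2:Int) ^ K ≠ 0 by positivity)
      omega
    rw [hK, hmodv, hmodd, pvZ K _ hK1 hvlt, pvZ K _ hK1 hdlt,
      pvBits, pvBits, pvMapReverse, pvMapReverse, List.zip_map', List.map_map]
    congr 1
    apply List.map_congr_left
    intro k hk
    rw [List.mem_range] at hk
    have hidx : (n - 1 - (k : Int)).toNat = K - 1 - k := by omega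
    have hjK : K - 1 - k < K := by omega
    have hd := pvBitEq dash K (K - 1 - k) hjK
    have hv := pvBitEq val K (K - 1 - k) hjK
    simp only [Function.comp_def]
    rw [hidx]
    simp only [pvBitChar, hd, hv]
    by_cases h1 : ((dash % (2 ^ K : Int)).toNat).testBit (K - 1 - k) = true <;>
      by_cases h2 : ((val % (2 ^ K : Int)).toNat).testBit (K - 1 - k) = true <;>
        simp [h1, h2]

-- ===== VERDICT (by name: the statement is the Claim_ definition above) =====
theorem pi_to_string_spec : Claim_equal_pi_to_string := by
  intro pi n _
  unfold Spec_pi_to_string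
  exact pi_to_string_eq pi n
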